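-- pv_equiv track=rewrite | github.com/pythonlearner1025/AIHunt | ft_datset.py | extract_message_pairs
-- ===== SOURCE A (Python) =====
-- from typing import List, Tuple, Dict
--
-- def extract_message_pairs(messages: List[Tuple[str, str]]) -> List[Dict[str, str]]:
--     """Extract message pairs where user is the other person and assistant is 'Me'."""
--     pairs = []
--
--     # Work backwards through messages
--     messages = list(reversed(messages))
--
--     i = 0
--     while i < len(messages):
--         # Find "Me" messages
--         if messages[i][0] == 'Me':
--             # Collect consecutive "Me" messages
--             my_messages = [messages[i][1]]
--             j = i + 1
--             while j < len(messages) and messages[j][0] == 'Me':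
--                 my_messages.append(messages[j][1])
--                 j += 1
--
--             # Now find the previous other person's messages
--             other_messages = []
--             while j < len(messages) and messages[j][0] != 'Me':
--                 other_messages.append(messages[j][1])
--                 j += 1
--
--             if other_messages:
--                 # Create the pair with other person as user, my response as assistant
--                 user_message = ' '.join(reversed(other_messages))
--                 assistant_response = ' '.join(reversed(my_messages))
--                 pairs.append({
--                     'user': user_message,
--                     'assistant': assistant_response
--                 })
--
--             i = j
--         else:
--             i += 1
--
--     # Return in chronological order
--     return list(reversed(pairs))
-- ===== SOURCE B (Python) =====
-- from itertools import groupby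
-- from typing import List, Tuple, Dict
--
-- def extract_message_pairs(messages: List[Tuple[str, str]]) -> List[Dict[str, str]]:
--     """Extract message pairs where user is the other person and assistant is 'Me'."""
--     pairs = []
--     prev = None  # values of the immediately preceding other-person run, if any
--     for is_me, grp in groupby(messages, key=lambda m: m[0] == 'Me'):
--         vals = [v for _, v in grp]
--         if is_me:
--             if prev is not None:
--                 pairs.append({'user': ' '.join(prev), 'assistant': ' '.join(vals)})
--             prev = None
--         else:
--             prev = vals
--     return pairs
-- ===== Notes on version B (the rewrite author's own statement) =====
-- stated objective: idiomatic
-- what changed: Instead of reversing the list and scanning backwards with nested index-seeking while loops plus two output reversals, B makes one forward itertools.groupby pass over runs, pairing each Me-run with the remembered preceding other-run, producing pairs directly in chronological order.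
import Mathlib
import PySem

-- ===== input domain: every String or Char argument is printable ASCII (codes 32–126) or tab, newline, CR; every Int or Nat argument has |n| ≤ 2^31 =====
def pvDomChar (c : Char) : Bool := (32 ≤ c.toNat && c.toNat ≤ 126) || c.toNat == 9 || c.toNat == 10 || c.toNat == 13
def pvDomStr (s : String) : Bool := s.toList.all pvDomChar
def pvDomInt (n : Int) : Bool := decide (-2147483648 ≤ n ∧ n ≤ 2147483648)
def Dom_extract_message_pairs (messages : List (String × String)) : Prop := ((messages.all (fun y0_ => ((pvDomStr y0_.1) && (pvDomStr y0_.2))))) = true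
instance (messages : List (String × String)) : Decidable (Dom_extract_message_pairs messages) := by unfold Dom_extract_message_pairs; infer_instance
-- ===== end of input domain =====

-- B replaces A's backward scan (reversed list, nested index-seeking while loops, two output
-- reversals) with one forward groupby pass over runs, pairing each Me-run with the remembered
-- preceding other-run; same result, chronological order directly (objective: idiomatic).

-- ===== PORT A =====
-- ' '.join(xs)
def joinSp (xs : List String) : String := PySem.Str.join " " xs

-- inner while collecting consecutive "Me" values (returns collected values, remaining suffix)
def takeMeA : List (String × String) → List String × List (String × String)
  | [] => ([], [])
  | (s, v) :: t =>
    if s == "Me" then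
      let r := takeMeA t
      (v :: r.1, r.2)
    else ([], (s, v) :: t)

-- inner while collecting consecutive non-"Me" values
def takeOtherA : List (String × String) → List String × List (String × String)
  | [] => ([], [])
  | (s, v) :: t =>
    if s == "Me" then ([], (s, v) :: t)
    else
      let r := takeOtherA t
      (v :: r.1, r.2)

theorem takeMeA_len (l : List (String × String)) : (takeMeA l).2.length ≤ l.length := by
  induction l with
  | nil => simp [takeMeA]
  | cons x t ih =>
    obtain ⟨s, v⟩ := x
    by_cases h : s == "Me" <;> simp [takeMeA, h] <;> omega

theorem takeOtherA_len (l : List (String × String)) : (takeOtherA l).2.length ≤ l.length := by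
  induction l with
  | nil => simp [takeOtherA]
  | cons x t ih =>
    obtain ⟨s, v⟩ := x
    by_cases h : s == "Me" <;> simp [takeOtherA, h] <;> omega

-- the outer while loop of A, run over the reversed list; appends pairs in discovery order
def loopA : List (String × String) → List (List (String × String))
  | [] => []
  | (s, v) :: t =>
    if s == "Me" then
      let ms := v :: (takeMeA t).1
      let r1 := (takeMeA t).2
      let os := (takeOtherA r1).1
      let r2 := (takeOtherA r1).2
      (if os ≠ [] then [[("user", joinSp os.reverse), ("assistant", joinSp ms.reverse)]] else [])
        ++ loopA r2
    else loopA t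
termination_by l => l.length
decreasing_by
  · have h1 := takeOtherA_len (takeMeA t).2
    have h2 := takeMeA_len t
    simp only [List.length_cons]; omega
  · simp only [List.length_cons]; omega

def extract_message_pairs (messages : List (String × String)) : List (List (String × String)) :=
  (loopA messages.reverse).reverse

-- ===== PORT B =====
-- one groupby step: prepend value v (flag f) onto the run list of the tail
def stepRun (f : Bool) (v : String) : List (Bool × List String) → List (Bool × List String)
  | (g, vs) :: rest => if f = g then (g, v :: vs) :: rest else (f, [v]) :: (g, vs) :: rest
  | [] => [(f, [v])]

-- itertools.groupby(messages, key = m[0]=='Me'), runs in order with their value lists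
def runsB : List (String × String) → List (Bool × List String)
  | [] => []
  | (s, v) :: t => stepRun (s == "Me") v (runsB t)

-- the for loop: prev = values of immediately preceding other-run (if any)
def goB : Option (List String) → List (Bool × List String) → List (List (String × String))
  | _, [] => []
  | prev, (isMe, vals) :: rest =>
    if isMe then
      (match prev with
       | some os => [[("user", joinSp os), ("assistant", joinSp vals)]]
       | none => []) ++ goB none rest
    else goB (some vals) rest

def extract_message_pairs_alt (messages : List (String × String)) : List (List (String × String)) :=
  goB none (runsB messages)

-- ===== PRECONDITION & SPEC =====
def Spec_extract_message_pairs (messages : List (String × String)) (out : List (List (String × String))) : Prop := out = extract_message_pairs_alt messages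
instance (messages : List (String × String)) (out : List (List (String × String))) : Decidable (Spec_extract_message_pairs messages out) := by unfold Spec_extract_message_pairs; infer_instance

-- ===== CLAIM (what is proved, stated in full; the proofs are below) =====
def Claim_equal_extract_message_pairs : Prop := ∀ (messages : List (String × String)), Dom_extract_message_pairs messages → Spec_extract_message_pairs messages (extract_message_pairs messages)

-- ===== LEMMAS AND PROOFS =====

-- append value v (flag f) at the END of a run list (what runsB does on a snoc input)
def snocRun (f : Bool) (v : String) : List (Bool × List String) → List (Bool × List String)
  | [] => [(f, [v])]
  | [(g, ws)] => if f = g then [(g, ws ++ [v])] else [(g, ws), (f, [v])]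
  | p :: q :: rest => p :: snocRun f v (q :: rest)

def revRun (p : Bool × List String) : Bool × List String := (p.1, p.2.reverse)

-- A's loop expressed on the run list of its (reversed) input
def loopRuns : List (Bool × List String) → List (List (String × String))
  | [] => []
  | (false, _) :: rest => loopRuns rest
  | (true, _) :: [] => []
  | (true, ms) :: (false, os) :: rest =>
    (if os ≠ [] then [[("user", joinSp os.reverse), ("assistant", joinSp ms.reverse)]] else [])
      ++ loopRuns rest
  | (true, _) :: (true, q) :: rest => loopRuns ((true, q) :: rest)

-- run lists produced by runsB: adjacent flags differ, all value lists nonempty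
def InvRuns (rs : List (Bool × List String)) : Prop :=
  rs.IsChain (fun p q => p.1 ≠ q.1) ∧ ∀ p ∈ rs, p.2 ≠ []

theorem step_snoc_comm (f : Bool) (v : String) (g : Bool) (w : String) :
    ∀ rs, stepRun g w (snocRun f v rs) = snocRun f v (stepRun g w rs) := by
  intro rs
  match rs with
  | [] =>
    by_cases h : f = g
    · subst h; simp [stepRun, snocRun]
    · have h' : ¬ g = f := fun e => h e.symm
      simp [stepRun, snocRun, h, h']
  | [(a, ws)] =>
    by_cases h : f = a <;> by_cases h' : g = a <;> simp [stepRun, snocRun, h, h']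
  | p :: q :: rest =>
    obtain ⟨a, ws⟩ := p
    by_cases h' : g = a <;> simp [stepRun, snocRun, h']

theorem runs_snoc (s : String) (v : String) :
    ∀ r, runsB (r ++ [(s, v)]) = snocRun (s == "Me") v (runsB r) := by
  intro r
  induction r with
  | nil => simp [runsB, stepRun, snocRun]
  | cons x t ih =>
    obtain ⟨s', v'⟩ := x
    simp [runsB, ih, step_snoc_comm]

theorem snocRun_append (f : Bool) (v : String) (p : Bool × List String) :
    ∀ xs, snocRun f v (xs ++ [p]) = xs ++ snocRun f v [p] := by
  intro xs
  induction xs with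
  | nil => simp
  | cons x t ih =>
    match t with
    | [] => obtain ⟨g, ws⟩ := p; simp [snocRun]
    | y :: t' =>
      show x :: snocRun f v (y :: t' ++ [p]) = x :: (y :: t' ++ snocRun f v [p])
      exact congrArg (x :: ·) ih

theorem runs_reverse : ∀ l : List (String × String),
    runsB l.reverse = ((runsB l).map revRun).reverse := by
  intro l
  induction l with
  | nil => simp [runsB]
  | cons x t ih =>
    obtain ⟨s, v⟩ := x
    rw [List.reverse_cons, runs_snoc, ih]
    show snocRun (s == "Me") v _ = ((stepRun (s == "Me") v (runsB t)).map revRun).reverse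
    cases hrt : runsB t with
    | nil => simp [stepRun, snocRun, revRun]
    | cons p rest =>
      obtain ⟨g, ws⟩ := p
      by_cases h : (s == "Me") = g <;>
        simp [stepRun, snocRun, snocRun_append, revRun, h]

theorem stepRun_shape (f : Bool) (v : String) (rs : List (Bool × List String)) :
    ∃ ws rest, stepRun f v rs = (f, ws) :: rest ∧ ws ≠ [] := by
  match rs with
  | [] => exact ⟨[v], [], by simp [stepRun], by simp⟩
  | (g, vs) :: rest =>
    by_cases h : f = g
    · subst h; exact ⟨v :: vs, rest, by simp [stepRun], by simp⟩
    · exact ⟨[v], (g, vs) :: rest, by simp [stepRun, h], by simp⟩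

theorem takeMeA_rest_head : ∀ (t : List (String × String)) s' v' t'',
    (takeMeA t).2 = (s', v') :: t'' → (s' == "Me") = false := by
  intro t
  induction t with
  | nil => intro s' v' t'' h; simp [takeMeA] at h
  | cons z t0 ih0 =>
    intro s' v' t'' h
    obtain ⟨sz, vz⟩ := z
    by_cases hz : sz == "Me"
    · simp only [takeMeA, hz, ite_true] at h
      exact ih0 s' v' t'' h
    · simp only [takeMeA, hz, Bool.false_eq_true, not_false_iff, ite_false] at h
      injection h with h1 h2
      cases h1
      simpa using hz

theorem runs_me_run (v : String) (s : String) (hs : (s == "Me") = true) :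
    ∀ t, runsB ((s, v) :: t) = (true, v :: (takeMeA t).1) :: runsB (takeMeA t).2 := by
  intro t
  induction t generalizing v s with
  | nil => simp [runsB, takeMeA, stepRun, hs]
  | cons x t' ih =>
    obtain ⟨s', v'⟩ := x
    by_cases h : s' == "Me"
    · have := ih v' s' h
      simp only [runsB] at this ⊢
      rw [this, hs, stepRun, if_pos rfl]
      simp [takeMeA, h]
    · simp only [takeMeA, h, Bool.false_eq_true, not_false_iff, ite_false]
      simp only [runsB, hs]
      obtain ⟨ws, rest, heq, _⟩ := stepRun_shape (s' == "Me") v' (runsB t')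
      rw [heq, stepRun]
      simp [h]

theorem runs_other_run (v : String) (s : String) (hs : (s == "Me") = false) :
    ∀ t, runsB ((s, v) :: t) = (false, v :: (takeOtherA t).1) :: runsB (takeOtherA t).2 := by
  intro t
  induction t generalizing v s with
  | nil => simp [runsB, takeOtherA, stepRun, hs]
  | cons x t' ih =>
    obtain ⟨s', v'⟩ := x
    by_cases h : s' == "Me"
    · simp only [takeOtherA, h, ite_true]
      simp only [runsB, hs]
      obtain ⟨ws, rest, heq, _⟩ := stepRun_shape (s' == "Me") v' (runsB t')
      rw [heq, stepRun]
      simp [h, hs]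
    · have := ih v' s' (by simp_all)
      simp only [runsB] at this ⊢
      rw [this, hs, stepRun, if_pos rfl]
      simp [takeOtherA, h]

theorem loopRuns_step_false (v : String) (rs : List (Bool × List String)) :
    loopRuns (stepRun false v rs) = loopRuns rs := by
  match rs with
  | [] => simp [stepRun, loopRuns]
  | (g, ws) :: rest =>
    cases g with
    | false => simp [stepRun, loopRuns]
    | true => simp [stepRun, loopRuns]

theorem loopA_eq_loopRuns : ∀ r, loopA r = loopRuns (runsB r) := by
  intro r
  induction hn : r.length using Nat.strong_induction_on generalizing r with
  | _ n ih =>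
  match r with
  | [] => simp [loopA, runsB, loopRuns]
  | (s, v) :: t =>
    by_cases hs : s == "Me"
    · rw [runs_me_run v s hs t]
      rw [loopA]
      simp only [hs, ite_true]
      cases hr1 : (takeMeA t).2 with
      | nil =>
        simp [takeOtherA, loopRuns, hr1, loopA, runsB]
      | cons y t'' =>
        obtain ⟨s', v'⟩ := y
        have hs' : (s' == "Me") = false := takeMeA_rest_head t s' v' t'' hr1
        rw [runs_other_run v' s' hs' t'']
        have hlen : ((takeOtherA t'').2).length < n := by
          have h1 := takeOtherA_len t''
          have h2 := takeMeA_len t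
          rw [hr1] at h2
          simp at h2
          simp at hn
          omega
        rw [loopRuns]
        have hih := ih _ hlen (takeOtherA t'').2 rfl
        simp [takeOtherA, hs', hih]
    · rw [loopA]
      simp only [hs, Bool.false_eq_true, not_false_iff, ite_false]
      have hlen : t.length < n := by simp at hn; omega
      rw [ih _ hlen _ rfl]
      show loopRuns (runsB t) = loopRuns (stepRun (s == "Me") v (runsB t))
      rw [show (s == "Me") = false by simp_all, loopRuns_step_false]

theorem goB_snoc_false (ws : List String) :
    ∀ xs prev, goB prev (xs ++ [(false, ws)]) = goB prev xs := by
  intro xs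
  induction xs with
  | nil => intro prev; simp [goB]
  | cons x rest ih =>
    intro prev
    obtain ⟨b, vs⟩ := x
    cases b <;> simp [goB, ih]

theorem goB_snoc_pair (os ms : List String) :
    ∀ xs prev, goB prev (xs ++ [(false, os), (true, ms)]) =
      goB prev xs ++ [[("user", joinSp os), ("assistant", joinSp ms)]] := by
  intro xs
  induction xs with
  | nil => intro prev; simp [goB]
  | cons x rest ih =>
    intro prev
    obtain ⟨b, vs⟩ := x
    cases b <;> simp [goB, ih]

theorem stepRun_inv (f : Bool) (v : String) (rs : List (Bool × List String))
    (h : InvRuns rs) : InvRuns (stepRun f v rs) := by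
  obtain ⟨hc, hn⟩ := h
  match rs with
  | [] =>
    refine ⟨?_, ?_⟩
    · simp only [stepRun]; exact List.isChain_singleton _
    · intro p hp
      simp only [stepRun, List.mem_singleton] at hp
      subst hp; simp
  | (g, vs) :: rest =>
    by_cases hfg : f = g
    · subst hfg
      have hstep : stepRun f v ((f, vs) :: rest) = (f, v :: vs) :: rest := by
        simp [stepRun]
      rw [hstep]
      refine ⟨?_, ?_⟩
      · match rest with
        | [] => exact List.isChain_singleton _
        | q :: rest' =>
          exact List.isChain_cons_cons.mpr
            ⟨(List.isChain_cons_cons.mp hc).1, (List.isChain_cons_cons.mp hc).2⟩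
      · intro p hp
        rw [List.mem_cons] at hp
        rcases hp with rfl | hmem
        · simp
        · exact hn p (List.mem_cons_of_mem _ hmem)
    · have hstep : stepRun f v ((g, vs) :: rest) = (f, [v]) :: (g, vs) :: rest := by
        simp [stepRun, hfg]
      rw [hstep]
      refine ⟨?_, ?_⟩
      · exact List.isChain_cons_cons.mpr ⟨by simpa using hfg, hc⟩
      · intro p hp
        rw [List.mem_cons] at hp
        rcases hp with rfl | hmem
        · simp
        · exact hn p hmem

theorem runsB_inv : ∀ l, InvRuns (runsB l) := by
  intro l
  induction l with
  | nil => exact ⟨List.isChain_nil, by simp [runsB]⟩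
  | cons x t ih =>
    obtain ⟨s, v⟩ := x
    exact stepRun_inv _ _ _ ih

theorem inv_transform (rs : List (Bool × List String)) (h : InvRuns rs) :
    InvRuns ((rs.map revRun).reverse) := by
  obtain ⟨hc, hn⟩ := h
  refine ⟨?_, ?_⟩
  · rw [List.isChain_reverse, List.isChain_map]
    refine hc.imp ?_
    intro a b hab
    exact fun e => hab e.symm
  · intro p hp
    simp only [List.mem_reverse, List.mem_map] at hp
    obtain ⟨q, hq, rfl⟩ := hp
    have := hn q hq
    simp [revRun, this]

theorem invRuns_tail (p : Bool × List String) (rest : List (Bool × List String))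
    (h : InvRuns (p :: rest)) : InvRuns rest :=
  ⟨(List.isChain_cons.mp h.1).2, fun q hq => h.2 q (List.mem_cons_of_mem _ hq)⟩

theorem loopRuns_reverse_eq : ∀ rs', InvRuns rs' →
    (loopRuns rs').reverse = goB none ((rs'.map revRun).reverse) := by
  intro rs'
  induction hn : rs'.length using Nat.strong_induction_on generalizing rs' with
  | _ n ih =>
  intro hinv
  match rs' with
  | [] => simp [loopRuns, goB]
  | (false, vs) :: rest =>
    have hrest : InvRuns rest := invRuns_tail _ _ hinv
    rw [loopRuns, ih rest.length (by simp at hn; omega) rest rfl hrest]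
    simp only [List.map_cons, List.reverse_cons, revRun]
    rw [goB_snoc_false]
  | (true, ms) :: [] =>
    show (loopRuns ((true, ms) :: [])).reverse = _
    rw [loopRuns]
    simp [goB, revRun]
  | (true, ms) :: (false, os) :: rest =>
    have hos : os ≠ [] := hinv.2 (false, os) (List.mem_cons_of_mem _ (List.mem_cons_self))
    have hrest : InvRuns rest := invRuns_tail _ _ (invRuns_tail _ _ hinv)
    rw [loopRuns, if_pos hos]
    rw [List.reverse_append, List.reverse_singleton,
      ih rest.length (by simp at hn; omega) rest rfl hrest]
    simp only [List.map_cons, List.reverse_cons, revRun]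
    rw [List.append_assoc, show ([(false, os.reverse)] ++ [(true, ms.reverse)]) =
      [(false, os.reverse), (true, ms.reverse)] from rfl, goB_snoc_pair]
  | (true, ms) :: (true, q) :: rest =>
    exact absurd rfl (List.isChain_cons_cons.mp hinv.1).1

theorem revRun_revRun (p : Bool × List String) : revRun (revRun p) = p := by
  simp [revRun]

-- ===== VERDICT (by name: the statement is the Claim_ definition above) =====
theorem extract_message_pairs_spec : Claim_equal_extract_message_pairs := by
  intro messages _
  unfold Spec_extract_message_pairs extract_message_pairs extract_message_pairs_alt
  rw [loopA_eq_loopRuns, runs_reverse]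
  rw [loopRuns_reverse_eq _ (inv_transform _ (runsB_inv messages))]
  rw [List.map_reverse, List.reverse_reverse, List.map_map,
    show revRun ∘ revRun = id from funext revRun_revRun, List.map_id]
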